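-- pv_equiv track=rewrite | github.com/akhilts03/Graph-Visualizer | server/traversal_algos.py | bfs
-- ===== SOURCE A (Python) =====
-- from collections import deque
--
-- def bfs(grid, startnodes):
--     """
--     Multisource BFS on a grid.
--
--     Parameters:
--     grid (list of list of int): 2D grid where BFS is performed.
--     startnodes (list of list of int): List of [x, y] positions from where BFS will start.
--
--     Returns:
--     visited_order (list of list of int): List of visited nodes in BFS order.
--     """
--     # Grid dimensions
--     m, n = len(grid), len(grid[0])
--
--     # Initialize visited
--     visited = [[0] * n for _ in range(m)]
--
--     # List to store BFS traversal order
--     visited_order = []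
--
--     # Queue for BFS
--     q = deque()
--
--     # Add all start nodes to the queue
--     for node in startnodes:
--         x, y = node
--         q.append([x, y])
--
--     # Directions for all 8 neighbors (up, down, left, right, and diagonals)
--     directions = [(-1, 0), (1, 0), (0, -1), (0, 1)]
--
--     # Perform BFS
--     while q:
--         pos = q.popleft()
--         i, j = pos[0], pos[1]
--         if(visited[i][j]):
--             continue
--
--         visited[i][j] = 1
--         # Append current node to the visited order list
--         visited_order.append([i, j])
--
--         for d in directions:
--             new_i, new_j = i + d[0], j + d[1]
--
--             # Check boundaries and whether the new cell is visited
--             if 0 <= new_i < m and 0 <= new_j < n and not visited[new_i][new_j]: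
--                 q.append([new_i, new_j])
--
--     return visited_order
-- ===== SOURCE B (Python) =====
-- def bfs(grid, startnodes):
--     """Multisource BFS traversal order, as a level-synchronous BFS (two-list frontiers instead of a deque)."""
--     m, n = len(grid), len(grid[0])
--     visited = [[0] * n for _ in range(m)]
--     visited_order = []
--     frontier = []
--     for node in startnodes:
--         x, y = node
--         frontier.append([x, y])
--     while frontier:
--         next_frontier = []
--         for pos in frontier:
--             i, j = pos[0], pos[1]
--             if visited[i][j]:
--                 continue
--             visited[i][j] = 1
--             visited_order.append([i, j])
--             for di, dj in ((-1, 0), (1, 0), (0, -1), (0, 1)):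
--                 ni, nj = i + di, j + dj
--                 if 0 <= ni < m and 0 <= nj < n and not visited[ni][nj]:
--                     next_frontier.append([ni, nj])
--         frontier = next_frontier
--     return visited_order
-- ===== Notes on version B (the rewrite author's own statement) =====
-- stated objective: alternative
-- what changed: Replaces the single deque-driven BFS loop with a level-synchronous BFS that processes one frontier list at a time and collects the next frontier in a second list, keeping the visited check at processing time so the traversal order is identical.
import Mathlib
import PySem

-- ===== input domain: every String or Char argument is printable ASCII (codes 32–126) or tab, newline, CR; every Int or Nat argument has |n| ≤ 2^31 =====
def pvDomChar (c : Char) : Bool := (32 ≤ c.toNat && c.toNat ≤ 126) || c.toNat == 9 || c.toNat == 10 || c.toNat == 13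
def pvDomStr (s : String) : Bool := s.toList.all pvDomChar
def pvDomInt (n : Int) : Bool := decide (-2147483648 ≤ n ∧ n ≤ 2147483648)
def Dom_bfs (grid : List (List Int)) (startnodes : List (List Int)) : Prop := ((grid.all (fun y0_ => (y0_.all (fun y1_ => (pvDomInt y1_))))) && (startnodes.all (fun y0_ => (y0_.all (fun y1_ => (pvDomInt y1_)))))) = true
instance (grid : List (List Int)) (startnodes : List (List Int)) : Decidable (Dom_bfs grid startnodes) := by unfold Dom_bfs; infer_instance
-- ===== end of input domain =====

-- B replaces A's single deque-driven loop by a level-synchronous BFS (process one frontier list,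
-- collect the next frontier, repeat); same traversal order, same cost class (objective: alternative).

-- ---- shared low-level helpers (Python primitives both sources use verbatim) ----

-- `x, y = node; q.append([x, y])` over startnodes; none = ValueError (node not a 2-list)
def unpack2 : List (List Int) → Option (List (List Int))
  | [] => some []
  | node :: rest =>
    match node with
    | [x, y] => (unpack2 rest).map (fun q => [x, y] :: q)
    | _ => none

-- visited[i][j] with Python (possibly negative) indexing; none = IndexError
def get2 (v : List (List Int)) (i j : Int) : Option Int :=
  (PySem.List.pyGet? v i).bind (fun row => PySem.List.pyGet? row j)

-- visited[i][j] = x; only used under a successful get2, where it is exact Python assignment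
def set2 (v : List (List Int)) (i j : Int) (x : Int) : List (List Int) :=
  match PySem.List.pyGet? v i with
  | none => v
  | some row => PySem.List.pySetD v i (PySem.List.pySetD row j x)

-- the 4-neighbour generation both sources share: bounds check, then `not visited[ni][nj]`
-- (`get2 v ni nj = some 0` is exact: in-bounds cells of the m×n visited grid exist and hold 0/1)
def nbrs (m n : Int) (v : List (List Int)) (i j : Int) : List (List Int) :=
  [((-1 : Int), (0 : Int)), (1, 0), (0, -1), (0, 1)].filterMap (fun d =>
    let ni := i + d.1
    let nj := j + d.2
    if 0 ≤ ni ∧ ni < m ∧ 0 ≤ nj ∧ nj < n ∧ get2 v ni nj = some 0 then some [ni, nj] else none)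

-- number of unvisited cells: the termination measure of both loops
def countZeros (v : List (List Int)) : Nat := (v.map (fun r => r.count 0)).sum

-- ---- termination lemmas (cited by the ports' decreasing_by; proofs are short and self-contained) ----

theorem nbrs_len_le (m n : Int) (v : List (List Int)) (i j : Int) :
    (nbrs m n v i j).length ≤ 4 := by
  have h := List.length_filterMap_le (fun d : Int × Int =>
    let ni := i + d.1
    let nj := j + d.2
    if 0 ≤ ni ∧ ni < m ∧ 0 ≤ nj ∧ nj < n ∧ get2 v ni nj = some 0 then some [ni, nj] else none)
    [((-1 : Int), (0 : Int)), (1, 0), (0, -1), (0, 1)]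
  simpa [nbrs] using h

theorem pyGet_set_bridge {α : Type} (xs : List α) (i : Int) (y v : α)
    (h : PySem.List.pyGet? xs i = some y) :
    ∃ k : Nat, xs[k]? = some y ∧ PySem.List.pySetD xs i v = xs.set k v := by
  unfold PySem.List.pyGet? at h
  cases hk : PySem.List.pyIdx? xs.length i with
  | none => rw [hk] at h; simp at h
  | some k =>
    rw [hk] at h
    simp at h
    exact ⟨k, h, by unfold PySem.List.pySetD PySem.List.pySet?; rw [hk]; rfl⟩

theorem count_set_zero (xs : List Int) (k : Nat) (h : xs[k]? = some 0) :
    (xs.set k (1 : Int)).count 0 + 1 = xs.count 0 := by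
  induction xs generalizing k with
  | nil => simp at h
  | cons x t ih =>
    cases k with
    | zero =>
      simp at h
      simp [h]
    | succ k' =>
      simp at h
      have := ih k' h
      simp [List.count_cons]
      omega

theorem countZeros_set_lt (v : List (List Int)) (k : Nat) (r r' : List Int)
    (hget : v[k]? = some r) (hlt : r'.count 0 < r.count 0) :
    countZeros (v.set k r') < countZeros v := by
  induction v generalizing k with
  | nil => simp at hget
  | cons hd t ih =>
    cases k with
    | zero =>
      simp at hget
      simp [countZeros, hget]
      omega
    | succ k' =>
      simp at hget
      have := ih k' hget
      simp [countZeros] at this ⊢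
      omega

theorem mark_lt (v : List (List Int)) (i j : Int) (h : get2 v i j = some 0) :
    countZeros (set2 v i j 1) < countZeros v := by
  unfold get2 at h
  cases hrow : PySem.List.pyGet? v i with
  | none => rw [hrow] at h; simp at h
  | some row =>
    rw [hrow] at h
    simp at h
    obtain ⟨kj, hkj, hsetrow⟩ := pyGet_set_bridge row j 0 1 h
    obtain ⟨ki, hki, hsetv⟩ := pyGet_set_bridge v i row (PySem.List.pySetD row j 1) hrow
    simp only [set2, hrow]
    rw [hsetv]
    apply countZeros_set_lt v ki row _ hki
    rw [hsetrow]
    have := count_set_zero row kj hkj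
    omega

-- ===== PORT A =====
-- A's BFS loop over a deque: pop the front, skip if visited, else mark, record, push neighbours.
-- On inputs where Python raises (excluded by Pre_) it returns the order built so far.
def bfsLoop (m n : Int) (visited order q : List (List Int)) : List (List Int) :=
  match q with
  | [] => order
  | pos :: rest =>
    match pos with
    | [i, j] =>
      match hg : get2 visited i j with
      | none => order
      | some val =>
        if hv : val ≠ 0 then bfsLoop m n visited order rest
        else
          bfsLoop m n (set2 visited i j 1) (order ++ [[i, j]])
            (rest ++ nbrs m n (set2 visited i j 1) i j)
    | _ => order
  termination_by 5 * countZeros visited + q.length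
  decreasing_by
  · simp only [List.length_cons]; omega
  · have h0 : val = 0 := by omega
    have h1 := mark_lt visited i j (h0 ▸ hg)
    have h2 := nbrs_len_le m n (set2 visited i j 1) i j
    simp only [List.length_append, List.length_cons]
    omega

def bfs (grid : List (List Int)) (startnodes : List (List Int)) : List (List Int) :=
  match PySem.List.pyGet? grid 0 with
  | none => []  -- grid[0] raises IndexError (excluded by Pre_)
  | some row0 =>
    match unpack2 startnodes with
    | none => []  -- `x, y = node` raises ValueError (excluded by Pre_)
    | some q =>
      bfsLoop (grid.length : Int) (row0.length : Int)
        (List.replicate grid.length (List.replicate row0.length (0 : Int))) [] q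

-- ===== PORT B =====
-- B's inner level loop: `for pos in frontier:` threading (visited, order, next_frontier);
-- first component false = Python raised (excluded by Pre_), keeping the order built so far.
def lev (m n : Int) : List (List Int) → List (List Int) → List (List Int) → List (List Int) →
    Bool × List (List Int) × List (List Int) × List (List Int)
  | [], visited, order, next => (true, visited, order, next)
  | pos :: rest, visited, order, next =>
    match pos with
    | [i, j] =>
      match get2 visited i j with
      | none => (false, visited, order, next)
      | some val =>
        if val ≠ 0 then lev m n rest visited order next
        else
          lev m n rest (set2 visited i j 1) (order ++ [[i, j]])
            (next ++ nbrs m n (set2 visited i j 1) i j)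
    | _ => (false, visited, order, next)

-- a level marks no cell ⇒ visited unchanged and nothing appended to next
theorem lev_zeros (m n : Int) : ∀ (f v o nx : List (List Int)),
    countZeros (lev m n f v o nx).2.1 ≤ countZeros v ∧
    ((lev m n f v o nx).2.2.2 ≠ nx → countZeros (lev m n f v o nx).2.1 < countZeros v) := by
  intro f
  induction f with
  | nil => intro v o nx; simp [lev]
  | cons pos rest ih =>
    intro v o nx
    match pos with
    | [i, j] =>
      simp only [lev]
      cases hg : get2 v i j with
      | none => simp
      | some val =>
        by_cases hv : val ≠ 0
        · simp [hv]; exact ih v o nx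
        · have h0 : val = 0 := by omega
          have hlt := mark_lt v i j (h0 ▸ hg)
          have h2 := ih (set2 v i j 1) (o ++ [[i, j]])
            (nx ++ nbrs m n (set2 v i j 1) i j)
          simp [hv]
          constructor
          · omega
          · intro _; omega
    | [] => simp [lev]
    | [_] => simp [lev]
    | _ :: _ :: _ :: _ => simp [lev]

-- B's outer loop: `while frontier:` process a whole level, then recurse on next_frontier
def bfsAltLoop (m n : Int) (visited order frontier : List (List Int)) : List (List Int) :=
  match frontier with
  | [] => order
  | pos :: rest =>
    match hr : lev m n (pos :: rest) visited order [] with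
    | (ok, v', o', next) => if ok then bfsAltLoop m n v' o' next else o'
  termination_by countZeros visited + (if frontier = [] then 0 else 1)
  decreasing_by
  · have h := lev_zeros m n (pos :: rest) visited order []
    rw [hr] at h
    simp at h ⊢
    by_cases hn : next = []
    · simp [hn]; omega
    · have := h.2 hn
      simp [hn]
      omega

def bfs_alt (grid : List (List Int)) (startnodes : List (List Int)) : List (List Int) :=
  match PySem.List.pyGet? grid 0 with
  | none => []  -- grid[0] raises IndexError (excluded by Pre_)
  | some row0 =>
    match unpack2 startnodes with
    | none => []  -- `x, y = node` raises ValueError (excluded by Pre_)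
    | some frontier =>
      bfsAltLoop (grid.length : Int) (row0.length : Int)
        (List.replicate grid.length (List.replicate row0.length (0 : Int))) [] frontier

-- ===== PRECONDITION & SPEC =====
-- Pre_ excludes exactly the inputs where Python A raises: the empty grid (IndexError at grid[0]),
-- a start node that is not a 2-list (ValueError at `x, y = node`), and a start coordinate outside
-- Python's index range of the visited grid (IndexError at visited[i][j]).
def Pre_bfs (grid : List (List Int)) (startnodes : List (List Int)) : Prop :=
  grid ≠ [] ∧ ∀ node ∈ startnodes, node.length = 2 ∧
    PySem.Raise.InRange grid.length (node.headD 0) ∧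
    PySem.Raise.InRange (grid.headD []).length ((node.drop 1).headD 0)
instance (grid : List (List Int)) (startnodes : List (List Int)) : Decidable (Pre_bfs grid startnodes) := by unfold Pre_bfs; infer_instance

def pvWitness_bfs : List (List Int) × List (List Int) := ([[0, 0], [1, 0]], [[0, 1], [-1, -1]])

def Spec_bfs (grid : List (List Int)) (startnodes : List (List Int)) (out : List (List Int)) : Prop := out = bfs_alt grid startnodes
instance (grid : List (List Int)) (startnodes : List (List Int)) (out : List (List Int)) : Decidable (Spec_bfs grid startnodes out) := by unfold Spec_bfs; infer_instance

-- ===== CLAIM (what is proved, stated in full; the proofs are below) =====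
def Claim_equal_bfs : Prop := ∀ (grid : List (List Int)) (startnodes : List (List Int)), Dom_bfs grid startnodes → Pre_bfs grid startnodes → Spec_bfs grid startnodes (bfs grid startnodes)

-- ===== LEMMAS AND PROOFS =====

-- running lev from accumulator nx only prepends nx to the collected next frontier
theorem lev_init (m n : Int) : ∀ (f v o nx : List (List Int)),
    lev m n f v o nx =
      ((lev m n f v o []).1, (lev m n f v o []).2.1, (lev m n f v o []).2.2.1,
        nx ++ (lev m n f v o []).2.2.2) := by
  intro f
  induction f with
  | nil => intro v o nx; simp [lev]
  | cons pos rest ih =>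
    intro v o nx
    match pos with
    | [i, j] =>
      simp only [lev]
      cases hg : get2 v i j with
      | none => simp
      | some val =>
        by_cases hv : val ≠ 0
        · simp [hv]; exact ih v o nx
        · simp [hv]
          rw [ih (set2 v i j 1) (o ++ [[i, j]]) (nx ++ nbrs m n (set2 v i j 1) i j),
              ih (set2 v i j 1) (o ++ [[i, j]]) (nbrs m n (set2 v i j 1) i j)]
          simp
    | [] => simp [lev]
    | [_] => simp [lev]
    | _ :: _ :: _ :: _ => simp [lev]

-- A's deque loop on f ++ q₂ = run one whole level f (as B does), then continue on q₂ ++ next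
theorem bfsLoop_split (m n : Int) : ∀ (f q₂ v o : List (List Int)),
    bfsLoop m n v o (f ++ q₂) =
      (if (lev m n f v o []).1 then
        bfsLoop m n (lev m n f v o []).2.1 (lev m n f v o []).2.2.1
          (q₂ ++ (lev m n f v o []).2.2.2)
      else (lev m n f v o []).2.2.1) := by
  intro f
  induction f with
  | nil => intro q₂ v o; simp [lev]
  | cons pos rest ih =>
    intro q₂ v o
    match pos with
    | [i, j] =>
      rw [List.cons_append]
      rw [bfsLoop]
      simp only [lev]
      cases hg : get2 v i j with
      | none => simp
      | some val =>
        by_cases hv : val ≠ 0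
        · simp [hv]; exact ih q₂ v o
        · simp [hv]
          rw [ih (q₂ ++ nbrs m n (set2 v i j 1) i j) (set2 v i j 1) (o ++ [[i, j]])]
          rw [lev_init m n rest (set2 v i j 1) (o ++ [[i, j]]) (nbrs m n (set2 v i j 1) i j)]
          simp
    | [] => rw [List.cons_append, bfsLoop.eq_def]; simp [lev]
    | [x] => rw [List.cons_append, bfsLoop.eq_def]; simp [lev]
    | x :: y :: z :: t => rw [List.cons_append, bfsLoop.eq_def]; simp [lev]

theorem loop_eq (m n : Int) : ∀ (z : Nat) (v o f : List (List Int)),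
    countZeros v = z → bfsLoop m n v o f = bfsAltLoop m n v o f := by
  intro z
  induction z using Nat.strong_induction_on with
  | _ z ih =>
    intro v o f hz
    match f with
    | [] => rw [bfsLoop, bfsAltLoop]
    | pos :: rest =>
      have hsplit := bfsLoop_split m n (pos :: rest) [] v o
      rw [List.append_nil] at hsplit
      rw [hsplit, bfsAltLoop]
      have hlz := lev_zeros m n (pos :: rest) v o []
      cases hr : lev m n (pos :: rest) v o [] with
      | mk ok rest' =>
        obtain ⟨v', o', next⟩ := rest'
        rw [hr] at hlz
        simp only [] at hlz
        simp at hlz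
        simp only
        by_cases hok : ok
        · simp [hok]
          match hnx : next with
          | [] => rw [bfsLoop, bfsAltLoop]
          | p2 :: r2 =>
            have hlt : countZeros v' < z := by
              have := hlz.2 (by simp)
              omega
            exact ih (countZeros v') hlt v' o' (p2 :: r2) rfl
        · simp [hok]

theorem bfs_eq_alt (grid startnodes : List (List Int)) :
    bfs grid startnodes = bfs_alt grid startnodes := by
  unfold bfs bfs_alt
  cases PySem.List.pyGet? grid 0 with
  | none => rfl
  | some row0 =>
    cases unpack2 startnodes with
    | none => rfl
    | some q =>
      exact loop_eq (grid.length : Int) (row0.length : Int) _ _ [] q rfl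

-- ===== VERDICT (by name: the statement is the Claim_ definition above) =====
theorem bfs_spec : Claim_equal_bfs := by
  intro grid startnodes _ _
  unfold Spec_bfs
  exact bfs_eq_alt grid startnodes
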